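-- pv_equiv track=rewrite | github.com/vikasjain1402/Hackerrank-Solutions | Hack_check_Credit_card.py | check_repeat
-- ===== SOURCE A (Python) =====
-- def check_repeat(string):
--     li=[]
--     for i in string:
--         if i.isdigit()==True:
--             li.append(i)
--     for i in range(len(li)-3):
--         if li[i]==li[i+1]==li[i+2]==li[i+3]:
--             return False
--
--     return True
-- ===== SOURCE B (Python) =====
-- def check_repeat(string):
--     prev = None
--     count = 0
--     for ch in string:
--         if ch.isdigit():
--             if ch == prev:
--                 count += 1
--                 if count == 4:
--                     return False
--             else:
--                 prev = ch
--                 count = 1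
--     return True
-- ===== Notes on version B (the rewrite author's own statement) =====
-- stated objective: simpler
-- what changed: Instead of building the list of digits and then checking every 4-window by index, B does one pass keeping only a previous digit and a run counter, returning False as soon as a run reaches 4.
import Mathlib
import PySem

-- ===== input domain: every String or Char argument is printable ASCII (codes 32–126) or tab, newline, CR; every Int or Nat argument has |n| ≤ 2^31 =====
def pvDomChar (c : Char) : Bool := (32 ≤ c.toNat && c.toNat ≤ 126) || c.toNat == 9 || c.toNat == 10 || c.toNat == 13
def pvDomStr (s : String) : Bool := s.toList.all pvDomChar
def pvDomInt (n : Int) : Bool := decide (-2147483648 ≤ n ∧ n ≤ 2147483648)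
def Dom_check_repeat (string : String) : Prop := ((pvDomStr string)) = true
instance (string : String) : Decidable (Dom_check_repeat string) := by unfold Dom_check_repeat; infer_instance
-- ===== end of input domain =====

-- B replaces A's build-digit-list-then-check-4-windows with a single pass keeping a
-- previous digit and a run counter (simpler, O(1) extra space).


-- ===== PORT A =====
-- second loop of A: for i in range(len(li)-3): if li[i]==li[i+1]==li[i+2]==li[i+3]: return False
def check_repeat_loop (li : List Char) : List Nat → Bool
  | [] => true
  | i :: rest =>
    if li.getD i ' ' = li.getD (i+1) ' ' ∧ li.getD (i+1) ' ' = li.getD (i+2) ' '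
        ∧ li.getD (i+2) ' ' = li.getD (i+3) ' ' then false
    else check_repeat_loop li rest

def check_repeat (string : String) : Bool :=
  let li : List Char :=
    string.toList.foldl (fun acc i => if PySem.Chars.isdigit i then acc ++ [i] else acc) []
  check_repeat_loop li (List.range (li.length - 3))

-- ===== PORT B =====
-- one pass: prev digit (none = no digit seen yet) and length of the current run
def check_repeat_alt_loop : List Char → Option Char → Nat → Bool
  | [], _, _ => true
  | ch :: rest, prev, count =>
    if PySem.Chars.isdigit ch then
      if some ch = prev then
        if count + 1 = 4 then false
        else check_repeat_alt_loop rest prev (count + 1)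
      else check_repeat_alt_loop rest (some ch) 1
    else check_repeat_alt_loop rest prev count

def check_repeat_alt (string : String) : Bool :=
  check_repeat_alt_loop string.toList none 0

-- ===== PRECONDITION & SPEC =====
def Spec_check_repeat (string : String) (out : Bool) : Prop := out = check_repeat_alt string
instance (string : String) (out : Bool) : Decidable (Spec_check_repeat string out) := by unfold Spec_check_repeat; infer_instance

-- ===== CLAIM (what is proved, stated in full; the proofs are below) =====
def Claim_equal_check_repeat : Prop := ∀ (string : String), Dom_check_repeat string → Spec_check_repeat string (check_repeat string)

-- ===== LEMMAS AND PROOFS =====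

-- does the list START with four equal characters?
def four? : List Char → Bool
  | a :: b :: c :: d :: _ => decide (a = b ∧ b = c ∧ c = d)
  | _ => false

-- reference predicate: no four consecutive equal characters anywhere
def noFour : List Char → Bool
  | [] => true
  | x :: xs => !four? (x :: xs) && noFour xs

theorem four?_short (l : List Char) (h : l.length ≤ 3) : four? l = false := by
  match l with
  | [] => rfl
  | [_] => rfl
  | [_, _] => rfl
  | [_, _, _] => rfl
  | _ :: _ :: _ :: _ :: _ => exact absurd h (by simp)

theorem noFour_short (l : List Char) (h : l.length ≤ 3) : noFour l = true := by
  induction l with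
  | nil => rfl
  | cons x xs ih =>
    rw [noFour, four?_short _ h, ih (by simp at h ⊢; omega)]
    rfl

-- shifting the index list by one moves the window one step into the list
theorem window_shift (a : Char) (xs : List Char) (idxs : List Nat) :
    check_repeat_loop (a :: xs) (idxs.map Nat.succ) = check_repeat_loop xs idxs := by
  induction idxs with
  | nil => rfl
  | cons i tl ih =>
    simp only [List.map_cons]
    rw [check_repeat_loop, check_repeat_loop]
    simp only [Nat.succ_eq_add_one, List.getD_cons_succ, ih]

-- A's window loop over range(len-3) equals noFour
theorem aLoop_eq_noFour (li : List Char) :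
    check_repeat_loop li (List.range (li.length - 3)) = noFour li := by
  match li with
  | [] => rfl
  | [_] => rfl
  | [_, _] => rfl
  | [_, _, _] => rfl
  | a :: b :: c :: d :: rest =>
    have hlen : (a :: b :: c :: d :: rest).length - 3 = rest.length + 1 := by simp
    rw [hlen, List.range_succ_eq_map, check_repeat_loop]
    by_cases h : a = b ∧ b = c ∧ c = d
    · simp only [List.getD_cons_zero, List.getD_cons_succ, if_pos h]
      simp [noFour, four?, h.1, h.2.1, h.2.2]
    · simp only [List.getD_cons_zero, List.getD_cons_succ, if_neg h]
      rw [window_shift,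
        show List.range rest.length = List.range ((b :: c :: d :: rest).length - 3) from by simp,
        aLoop_eq_noFour (b :: c :: d :: rest)]
      have hf : four? (a :: b :: c :: d :: rest) = false := by
        simp only [four?, decide_eq_false_iff_not]; exact h
      show noFour (b :: c :: d :: rest)
          = (!four? (a :: b :: c :: d :: rest) && noFour (b :: c :: d :: rest))
      rw [hf]; simp

-- skipping non-digits: B's loop only looks at the digits
theorem bLoop_filter (l : List Char) (prev : Option Char) (count : Nat) :
    check_repeat_alt_loop l prev count
      = check_repeat_alt_loop (l.filter PySem.Chars.isdigit) prev count := by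
  induction l generalizing prev count with
  | nil => rfl
  | cons ch rest ih =>
    by_cases h : PySem.Chars.isdigit ch
    · simp only [List.filter_cons_of_pos h, check_repeat_alt_loop, if_pos h]
      split_ifs <;> first | rfl | apply ih
    · simp only [List.filter_cons_of_neg h, check_repeat_alt_loop, if_neg h]
      apply ih

-- a run of ≤3 copies of p in front of a different head does not start four equal
theorem four?_ne1 (p x : Char) (l : List Char) (h : x ≠ p) : four? (p :: x :: l) = false := by
  match l with
  | [] => rfl
  | [_] => rfl
  | _ :: _ :: _ =>
    simp only [four?, decide_eq_false_iff_not]; rintro ⟨h1, -⟩; exact h h1.symm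

theorem four?_ne2 (p x : Char) (l : List Char) (h : x ≠ p) : four? (p :: p :: x :: l) = false := by
  match l with
  | [] => rfl
  | _ :: _ =>
    simp only [four?, decide_eq_false_iff_not]; rintro ⟨-, h2, -⟩; exact h h2.symm

theorem four?_ne3 (p x : Char) (l : List Char) (h : x ≠ p) :
    four? (p :: p :: p :: x :: l) = false := by
  simp only [four?, decide_eq_false_iff_not]; rintro ⟨-, -, h3⟩; exact h h3.symm

theorem noFour_drop1 (p x : Char) (l : List Char) (h : x ≠ p) :
    noFour (p :: x :: l) = noFour (x :: l) := by
  show (!four? (p :: x :: l) && noFour (x :: l)) = noFour (x :: l)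
  rw [four?_ne1 p x l h]; simp

theorem noFour_drop2 (p x : Char) (l : List Char) (h : x ≠ p) :
    noFour (p :: p :: x :: l) = noFour (x :: l) := by
  show (!four? (p :: p :: x :: l) && noFour (p :: x :: l)) = noFour (x :: l)
  rw [four?_ne2 p x l h, noFour_drop1 p x l h]; simp

theorem noFour_drop3 (p x : Char) (l : List Char) (h : x ≠ p) :
    noFour (p :: p :: p :: x :: l) = noFour (x :: l) := by
  show (!four? (p :: p :: p :: x :: l) && noFour (p :: p :: x :: l)) = noFour (x :: l)
  rw [four?_ne3 p x l h, noFour_drop2 p x l h]; simp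

theorem noFour_drop (c : Nat) (hc : c ≤ 3) (p x : Char) (l : List Char) (hpx : x ≠ p) :
    noFour (List.replicate c p ++ x :: l) = noFour (x :: l) := by
  interval_cases c
  · rfl
  · exact noFour_drop1 p x l hpx
  · exact noFour_drop2 p x l hpx
  · exact noFour_drop3 p x l hpx

def runCtx : Option Char → Nat → List Char
  | none, _ => []
  | some p, c => List.replicate c p

-- the core invariant of B's scan, on digit-only lists
theorem bLoop_eq_noFour (l : List Char) (prev : Option Char) (count : Nat)
    (hc : count ≤ 3) (hd : ∀ x ∈ l, PySem.Chars.isdigit x = true) :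
    check_repeat_alt_loop l prev count = noFour (runCtx prev count ++ l) := by
  induction l generalizing prev count with
  | nil =>
    rw [check_repeat_alt_loop, List.append_nil]
    refine (noFour_short _ ?_).symm
    match prev with
    | none => simp [runCtx]
    | some p => simpa [runCtx] using hc
  | cons ch rest ih =>
    have hch : PySem.Chars.isdigit ch = true := hd ch (by simp)
    have hdr : ∀ x ∈ rest, PySem.Chars.isdigit x = true := fun x hx => hd x (by simp [hx])
    rw [check_repeat_alt_loop, if_pos hch]
    by_cases he : some ch = prev
    · obtain ⟨p, rfl⟩ : ∃ p, prev = some p := ⟨ch, he.symm⟩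
      have hcp : ch = p := by injection he
      subst hcp
      by_cases hc4 : count + 1 = 4
      · rw [if_pos he, if_pos hc4]
        have h3 : count = 3 := by omega
        subst h3
        rw [show runCtx (some ch) 3 ++ ch :: rest = ch :: ch :: ch :: ch :: rest from rfl]
        simp [noFour, four?]
      · rw [if_pos he, if_neg hc4]
        rw [ih (some ch) (count + 1) (by omega) hdr]
        congr 1
        show List.replicate (count + 1) ch ++ rest = List.replicate count ch ++ ch :: rest
        rw [List.replicate_succ', List.append_assoc, List.singleton_append]
    · rw [if_neg he]
      rw [ih (some ch) 1 (by omega) hdr]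
      match prev with
      | none => simp [runCtx]
      | some p =>
        have hpx : ch ≠ p := fun h => he (by rw [h])
        exact (noFour_drop count hc p ch rest hpx).symm

-- ===== VERDICT (by name: the statement is the Claim_ definition above) =====
theorem check_repeat_spec : Claim_equal_check_repeat := by
  intro s _
  show check_repeat s = check_repeat_alt s
  unfold check_repeat check_repeat_alt
  rw [PySem.List.foldl_append_if_eq_filter, List.nil_append]
  rw [aLoop_eq_noFour, bLoop_filter]
  rw [bLoop_eq_noFour _ none 0 (by omega) (fun x hx => (List.mem_filter.mp hx).2)]
  simp [runCtx]
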